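-- pv_equiv track=rewrite | github.com/ynput/ayon-backend | ayon_server/utils.py | dict_exclude
-- ===== SOURCE A (Python) =====
-- from typing import Any, Callable, Iterable
--
-- def dict_exclude(
--     data: dict[Any, Any],
--     keys: list[str],
--     mode: str = "exact",
-- ) -> dict[Any, Any]:
--     """Return a copy of the dictionary with the specified keys removed."""
--     if mode == "exact":
--         return {k: v for k, v in data.items() if k not in keys}
--     elif mode == "startswith":
--         return {
--             k: v for k, v in data.items() if not any(k.startswith(key) for key in keys)
--         }
--     return data
-- ===== SOURCE B (Python) =====
-- def dict_exclude(
--     data,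
--     keys,
--     mode="exact",
-- ):
--     """Return a copy of the dictionary with the specified keys removed."""
--     if mode == "exact":
--         table = sorted(keys)
--
--         def drop(k):
--             j = _count_le(table, k) - 1
--             return j >= 0 and table[j] == k
--     elif mode == "startswith":
--         # keep only the minimal prefixes: a sorted scan drops any prefix that
--         # extends the previously kept one, so one binary-search probe per key
--         # has a single candidate to test
--         table = []
--         for p in sorted(keys):
--             if not (table and p.startswith(table[-1])):
--                 table.append(p)
--
--         def drop(k):
--             j = _count_le(table, k) - 1
--             return j >= 0 and k.startswith(table[j])
--     else:
--         return data
--     return {k: v for k, v in data.items() if not drop(k)}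
--
--
-- def _count_le(table, k):
--     # binary search: how many entries of the sorted list `table` are <= k
--     lo, hi = 0, len(table)
--     while lo < hi:
--         mid = (lo + hi) // 2
--         if k < table[mid]:
--             hi = mid
--         else:
--             lo = mid + 1
--     return lo
-- ===== Notes on version B (the rewrite author's own statement) =====
-- stated objective: alternative
-- what changed: Instead of scanning the whole keys list per dict entry (membership / any-startswith), B preprocesses keys into a sorted table (exact mode) or a sorted minimal-prefix table pruned of redundant prefixes (startswith mode) and decides each dict key with a single binary-search probe against one candidate entry.
import Mathlib
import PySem

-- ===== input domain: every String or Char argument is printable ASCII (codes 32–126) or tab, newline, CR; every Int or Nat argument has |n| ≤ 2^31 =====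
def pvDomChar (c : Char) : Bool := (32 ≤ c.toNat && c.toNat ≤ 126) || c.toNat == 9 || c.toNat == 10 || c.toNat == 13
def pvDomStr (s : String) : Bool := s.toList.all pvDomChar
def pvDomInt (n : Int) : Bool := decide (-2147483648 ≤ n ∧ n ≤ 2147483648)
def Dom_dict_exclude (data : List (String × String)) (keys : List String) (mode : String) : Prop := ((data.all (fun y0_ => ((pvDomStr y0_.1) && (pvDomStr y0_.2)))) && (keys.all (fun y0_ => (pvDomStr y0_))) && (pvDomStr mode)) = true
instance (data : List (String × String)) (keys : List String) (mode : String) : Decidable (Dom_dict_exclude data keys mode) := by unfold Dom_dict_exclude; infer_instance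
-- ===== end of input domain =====

-- B replaces the per-item linear scans over `keys` by a sorted table (exact mode) / a pruned minimal-prefix table (startswith mode) probed with one binary search per key; alternative algorithm.


-- ===== PORT A =====
-- Python A's dict comprehensions over data.items(); on dict-shaped inputs (distinct
-- keys, see Pre_) each comprehension is exactly a filter of the item list.
def dict_exclude (data : List (String × String)) (keys : List String) (mode : String) : List (String × String) :=
  if mode == "exact" then
    data.filter (fun kv => !(keys.contains kv.1))
  else if mode == "startswith" then
    data.filter (fun kv => !(keys.any (fun key => PySem.Str.startswith kv.1 key)))
  else data

-- ===== PORT B =====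
-- _count_le(table, k): binary search over the sorted table, 'mid = (lo+hi)//2' inlined.
def pvCountLeLoop (table : List String) (k : String) (lo hi : Nat) : Nat :=
  if lo < hi then
    if k < table.getD ((lo + hi) / 2) "" then pvCountLeLoop table k lo ((lo + hi) / 2)
    else pvCountLeLoop table k ((lo + hi) / 2 + 1) hi
  else lo
termination_by hi - lo
decreasing_by all_goals omega

def pvCountLe (table : List String) (k : String) : Nat := pvCountLeLoop table k 0 table.length

-- drop(k) of the exact branch: 'j = _count_le(table, k) - 1; j >= 0 and table[j] == k'
def pvDropExact (table : List String) (k : String) : Bool :=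
  let c := pvCountLe table k
  decide (1 ≤ c) && (table.getD (c - 1) "" == k)

-- the pruning loop body: 'if not (table and p.startswith(table[-1])): table.append(p)'
def pvPruneStep (acc : List String) (p : String) : List String :=
  match acc.getLast? with
  | some q => if PySem.Str.startswith p q then acc else acc ++ [p]
  | none => acc ++ [p]

-- drop(k) of the startswith branch: 'j = _count_le(table, k) - 1; j >= 0 and k.startswith(table[j])'
def pvDropStarts (table : List String) (k : String) : Bool :=
  let c := pvCountLe table k
  decide (1 ≤ c) && PySem.Str.startswith k (table.getD (c - 1) "")

def dict_exclude_alt (data : List (String × String)) (keys : List String) (mode : String) : List (String × String) :=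
  if mode == "exact" then
    let table := PySem.List.sorted keys (fun x => x) false
    data.filter (fun kv => !pvDropExact table kv.1)
  else if mode == "startswith" then
    let table := (PySem.List.sorted keys (fun x => x) false).foldl pvPruneStep []
    data.filter (fun kv => !pvDropStarts table kv.1)
  else data

-- ===== PRECONDITION & SPEC =====
-- Pre_ says the association list encodes a Python dict: its keys are pairwise distinct
-- (a duplicate-key list corresponds to no Python input of type dict at all).
def Pre_dict_exclude (data : List (String × String)) (keys : List String) (mode : String) : Prop :=
  (data.map Prod.fst).Nodup
instance (data : List (String × String)) (keys : List String) (mode : String) : Decidable (Pre_dict_exclude data keys mode) := by unfold Pre_dict_exclude; infer_instance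

def pvWitness_dict_exclude : (List (String × String)) × List String × String :=
  ([("ab", "1"), ("cd", "2"), ("ce", "3")], ["c", "x"], "startswith")

def Spec_dict_exclude (data : List (String × String)) (keys : List String) (mode : String) (out : List (String × String)) : Prop := out = dict_exclude_alt data keys mode
instance (data : List (String × String)) (keys : List String) (mode : String) (out : List (String × String)) : Decidable (Spec_dict_exclude data keys mode out) := by unfold Spec_dict_exclude; infer_instance

-- ===== CLAIM (what is proved, stated in full; the proofs are below) =====
def Claim_equal_dict_exclude : Prop := ∀ (data : List (String × String)) (keys : List String) (mode : String), Dom_dict_exclude data keys mode → Pre_dict_exclude data keys mode → Spec_dict_exclude data keys mode (dict_exclude data keys mode)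

-- ===== LEMMAS AND PROOFS =====

theorem sw_iff (s p : String) : PySem.Str.startswith s p = true ↔ p.toList <+: s.toList := by
  simp [PySem.Chars.startswith_iff]

-- a prefix is never lexicographically greater than the whole word
theorem chars_not_lt_of_prefix : ∀ {q s : List Char}, q <+: s → ¬ s < q := by
  intro q
  induction q with
  | nil => intro s _; exact List.not_lt_nil s
  | cons c q ih =>
    intro s h hlt
    match s, h with
    | _ :: s', h =>
      rw [List.cons_prefix_cons] at h
      obtain ⟨rfl, h2⟩ := h
      rcases List.cons_lt_cons_iff.mp hlt with hcc | ⟨_, hlt'⟩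
      · exact lt_irrefl _ hcc
      · exact ih h2 hlt'

theorem chars_prefix_le {q s : List Char} (h : q <+: s) : q ≤ s :=
  Std.not_lt.mp (chars_not_lt_of_prefix h)

-- if q is a prefix of s and q < t ≤ s, then q is also a prefix of t
theorem lex_prefix_between : ∀ (q t s : List Char), q <+: s → q < t → t ≤ s → q <+: t := by
  intro q
  induction q with
  | nil => intro t s _ _ _; exact List.nil_prefix
  | cons c q ih =>
    intro t s hpre hlt hle
    have hns : ¬ s < t := Std.not_lt.mpr hle
    match s, hpre with
    | _ :: s', hpre =>
      rw [List.cons_prefix_cons] at hpre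
      obtain ⟨rfl, hps⟩ := hpre
      match t with
      | [] => exact absurd hlt (List.not_lt_nil _)
      | d :: t' =>
        rcases List.cons_lt_cons_iff.mp hlt with hcd | ⟨rfl, hqt⟩
        · exact absurd (List.cons_lt_cons_iff.mpr (Or.inl hcd)) hns
        · have hts : t' ≤ s' := Std.not_lt.mp
            (fun hl => hns (List.cons_lt_cons_iff.mpr (Or.inr ⟨rfl, hl⟩)))
          exact List.cons_prefix_cons.mpr ⟨rfl, ih t' s' hps hqt hts⟩

-- getD over a ≤-sorted list is monotone in the index (within range)
theorem getD_mono {t : List String} (hs : t.Pairwise (· ≤ ·)) {i j : Nat}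
    (hij : i ≤ j) (hj : j < t.length) : t.getD i "" ≤ t.getD j "" := by
  rw [List.getD_eq_getElem t "" (by omega), List.getD_eq_getElem t "" hj]
  rcases Nat.lt_or_eq_of_le hij with h | h
  · exact List.pairwise_iff_getElem.mp hs i j (by omega) hj h
  · subst h; exact le_rfl

-- every member of a ≤-sorted list is ≤ its last element
theorem le_getLast? {l : List String} (h : l.Pairwise (· ≤ ·)) {a q : String}
    (ha : a ∈ l) (hq : l.getLast? = some q) : a ≤ q := by
  induction l with
  | nil => simp at ha
  | cons x l ih =>
    rcases List.pairwise_cons.mp h with ⟨hx, hl⟩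
    cases l with
    | nil =>
      simp at ha hq
      subst ha; subst hq; exact le_rfl
    | cons y l' =>
      rw [List.getLast?_cons_cons] at hq
      rcases List.mem_cons.mp ha with rfl | ha'
      · exact hx q (List.mem_of_getLast? hq)
      · exact ih hl ha' hq

-- the two Pairwise facts give prefix-freeness for every strictly increasing pair of members
theorem pairwise_mem_of_lt {l : List String}
    (h1 : l.Pairwise (· ≤ ·)) (h2 : l.Pairwise (fun a b => ¬ a.toList <+: b.toList))
    {a b : String} (ha : a ∈ l) (hb : b ∈ l) (hab : a < b) : ¬ a.toList <+: b.toList := by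
  obtain ⟨i, hi, rfl⟩ := List.mem_iff_getElem.mp ha
  obtain ⟨j, hj, rfl⟩ := List.mem_iff_getElem.mp hb
  rcases Nat.lt_trichotomy i j with hij | rfl | hij
  · exact List.pairwise_iff_getElem.mp h2 i j hi hj hij
  · exact absurd hab (lt_irrefl _)
  · exact absurd (List.pairwise_iff_getElem.mp h1 j i hj hi hij) (not_le.mpr hab)

-- the binary search splits [lo,hi) at the number of entries ≤ k (sorted table)
theorem countLeLoop_spec (table : List String) (k : String) (hs : table.Pairwise (· ≤ ·)) :
    ∀ (n lo hi : Nat), hi - lo ≤ n → lo ≤ hi → hi ≤ table.length →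
      lo ≤ pvCountLeLoop table k lo hi ∧ pvCountLeLoop table k lo hi ≤ hi ∧
      (∀ j, lo ≤ j → j < pvCountLeLoop table k lo hi → table.getD j "" ≤ k) ∧
      (∀ j, pvCountLeLoop table k lo hi ≤ j → j < hi → k < table.getD j "") := by
  intro n
  induction n with
  | zero =>
    intro lo hi h1 h2 h3
    have hnlt : ¬ lo < hi := by omega
    rw [pvCountLeLoop, if_neg hnlt]
    exact ⟨le_rfl, h2, fun j hj1 hj2 => by omega, fun j hj1 hj2 => by omega⟩
  | succ n ih =>
    intro lo hi h1 h2 h3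
    by_cases hlt : lo < hi
    · by_cases hk : k < table.getD ((lo + hi) / 2) ""
      · rw [pvCountLeLoop, if_pos hlt, if_pos hk]
        obtain ⟨c1, c2, c3, c4⟩ := ih lo ((lo + hi) / 2) (by omega) (by omega) (by omega)
        refine ⟨c1, by omega, c3, fun j hj1 hj2 => ?_⟩
        by_cases hjm : j < (lo + hi) / 2
        · exact c4 j hj1 hjm
        · exact lt_of_lt_of_le hk (getD_mono hs (by omega) (by omega))
      · rw [pvCountLeLoop, if_pos hlt, if_neg hk]
        obtain ⟨c1, c2, c3, c4⟩ := ih ((lo + hi) / 2 + 1) hi (by omega) (by omega) h3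
        refine ⟨by omega, c2, fun j hj1 hj2 => ?_, c4⟩
        by_cases hjm : (lo + hi) / 2 + 1 ≤ j
        · exact c3 j hjm hj2
        · exact le_trans (getD_mono hs (show j ≤ (lo + hi) / 2 by omega) (by omega)) (not_lt.mp hk)
    · rw [pvCountLeLoop, if_neg hlt]
      exact ⟨le_rfl, h2, fun j hj1 hj2 => by omega, fun j hj1 hj2 => by omega⟩

theorem countLe_spec (table : List String) (k : String) (hs : table.Pairwise (· ≤ ·)) :
    pvCountLe table k ≤ table.length ∧
    (∀ j, j < pvCountLe table k → table.getD j "" ≤ k) ∧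
    (∀ j, pvCountLe table k ≤ j → j < table.length → k < table.getD j "") := by
  obtain ⟨h1, h2, h3, h4⟩ :=
    countLeLoop_spec table k hs (table.length - 0) 0 table.length (by omega) (by omega) (by omega)
  exact ⟨h2, fun j hj => h3 j (Nat.zero_le j) hj, h4⟩

-- the pruning fold: output sorted, prefix-free, drawn from the input, and every input
-- element has a kept prefix
theorem prune_spec : ∀ (l acc : List String),
    l.Pairwise (· ≤ ·) → acc.Pairwise (· ≤ ·) →
    (∀ a ∈ acc, ∀ x ∈ l, a ≤ x) →
    acc.Pairwise (fun a b => ¬ a.toList <+: b.toList) →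
    ((l.foldl pvPruneStep acc).Pairwise (· ≤ ·) ∧
     (l.foldl pvPruneStep acc).Pairwise (fun a b => ¬ a.toList <+: b.toList) ∧
     (∀ q ∈ l.foldl pvPruneStep acc, q ∈ acc ∨ q ∈ l) ∧
     (∀ a ∈ acc, a ∈ l.foldl pvPruneStep acc) ∧
     (∀ x ∈ l, ∃ q ∈ l.foldl pvPruneStep acc, q.toList <+: x.toList)) := by
  intro l
  induction l with
  | nil =>
    intro acc _ hacc _ hnp
    exact ⟨hacc, hnp, fun q hq => Or.inl hq, fun a ha => ha, by simp⟩
  | cons x l ih =>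
    intro acc hl hacc hle hnp
    rcases List.pairwise_cons.mp hl with ⟨hxl, hl'⟩
    have hlex : ∀ a ∈ acc, a ≤ x := fun a ha => hle a ha x (List.mem_cons_self)
    -- analyse the step
    rcases hgl : acc.getLast? with _ | q0
    -- acc = [], append x
    case none =>
      have hacc0 : acc = [] := List.getLast?_eq_none_iff.mp hgl
      subst hacc0
      have step : pvPruneStep [] x = [x] := by simp [pvPruneStep]
      rw [List.foldl_cons, step]
      obtain ⟨c1, c2, c3, c4, c5⟩ := ih [x] hl'
        (by simp) (by intro a ha y hy; simp at ha; subst ha; exact hxl y hy) (by simp)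
      refine ⟨c1, c2, ?_, ?_, ?_⟩
      · intro q hq
        rcases c3 q hq with hq' | hq'
        · simp at hq'; subst hq'; exact Or.inr (List.mem_cons_self)
        · exact Or.inr (List.mem_cons_of_mem x hq')
      · intro a ha; simp at ha
      · intro y hy
        rcases List.mem_cons.mp hy with rfl | hy'
        · exact ⟨y, c4 y (by simp), List.prefix_refl _⟩
        · exact c5 y hy'
    case some =>
      have hq0mem : q0 ∈ acc := List.mem_of_getLast? hgl
      by_cases hsw : PySem.Str.startswith x q0 = true
      -- skip x
      · have step : pvPruneStep acc x = acc := by simp only [pvPruneStep, hgl]; rw [if_pos hsw]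
        rw [List.foldl_cons, step]
        obtain ⟨c1, c2, c3, c4, c5⟩ := ih acc hl' hacc
          (fun a ha y hy => hle a ha y (List.mem_cons_of_mem x hy)) hnp
        refine ⟨c1, c2, ?_, c4, ?_⟩
        · intro q hq
          rcases c3 q hq with hq' | hq'
          · exact Or.inl hq'
          · exact Or.inr (List.mem_cons_of_mem x hq')
        · intro y hy
          rcases List.mem_cons.mp hy with rfl | hy'
          · exact ⟨q0, c4 q0 hq0mem, (sw_iff y q0).mp hsw⟩
          · exact c5 y hy'
      -- append x
      · have step : pvPruneStep acc x = acc ++ [x] := by simp only [pvPruneStep, hgl]; rw [if_neg hsw]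
        rw [List.foldl_cons, step]
        have hnpx : ∀ a ∈ acc, ¬ a.toList <+: x.toList := by
          intro a ha hpre
          by_cases haq : a = q0
          · subst haq; exact hsw ((sw_iff x a).mpr hpre)
          · have halt : a < q0 := lt_of_le_of_ne (le_getLast? hacc ha hgl) haq
            have hq0x : q0 ≤ x := hlex q0 hq0mem
            have : a.toList <+: q0.toList :=
              lex_prefix_between a.toList q0.toList x.toList hpre
                (String.lt_iff_toList_lt.mp halt) (String.le_iff_toList_le.mp hq0x)
            exact pairwise_mem_of_lt hacc hnp ha hq0mem halt this
        have hacc' : (acc ++ [x]).Pairwise (· ≤ ·) := by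
          rw [List.pairwise_append]
          exact ⟨hacc, by simp, by intro a ha y hy; simp at hy; subst hy; exact hlex a ha⟩
        have hnp' : (acc ++ [x]).Pairwise (fun a b => ¬ a.toList <+: b.toList) := by
          rw [List.pairwise_append]
          exact ⟨hnp, by simp, by intro a ha y hy; simp at hy; subst hy; exact hnpx a ha⟩
        obtain ⟨c1, c2, c3, c4, c5⟩ := ih (acc ++ [x]) hl' hacc'
          (by
            intro a ha y hy
            rcases List.mem_append.mp ha with ha' | ha'
            · exact hle a ha' y (List.mem_cons_of_mem x hy)
            · simp at ha'; subst ha'; exact hxl y hy) hnp'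
        refine ⟨c1, c2, ?_, ?_, ?_⟩
        · intro q hq
          rcases c3 q hq with hq' | hq'
          · rcases List.mem_append.mp hq' with h | h
            · exact Or.inl h
            · simp at h; subst h; exact Or.inr (List.mem_cons_self)
          · exact Or.inr (List.mem_cons_of_mem x hq')
        · intro a ha; exact c4 a (List.mem_append_left _ ha)
        · intro y hy
          rcases List.mem_cons.mp hy with rfl | hy'
          · exact ⟨y, c4 y (List.mem_append_right _ (by simp)), List.prefix_refl _⟩
          · exact c5 y hy'

-- per-key agreement of the two exact-mode tests
theorem exact_pred (keys : List String) (k : String) :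
    keys.contains k = pvDropExact (PySem.List.sorted keys (fun x => x) false) k := by
  set t := PySem.List.sorted keys (fun x => x) false with ht
  have hs : t.Pairwise (· ≤ ·) := PySem.List.sorted_pairwise keys (fun x => x)
  obtain ⟨hlen, hbelow, habove⟩ := countLe_spec t k hs
  rw [Bool.eq_iff_iff]
  unfold pvDropExact
  simp only [List.contains_iff_mem, Bool.and_eq_true, decide_eq_true_eq, beq_iff_eq]
  constructor
  · intro hk
    have hkt : k ∈ t := (PySem.List.mem_sorted _ _ _ _).mpr hk
    obtain ⟨i, hi, hti⟩ := List.mem_iff_getElem.mp hkt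
    have hgd : t.getD i "" = k := by rw [List.getD_eq_getElem t "" hi]; exact hti
    have hic : i < pvCountLe t k := by
      by_contra hcon
      exact absurd (habove i (by omega) hi) (by rw [hgd]; exact lt_irrefl k)
    refine ⟨by omega, le_antisymm (hbelow _ (by omega)) ?_⟩
    have hmono := getD_mono hs (show i ≤ pvCountLe t k - 1 by omega)
      (show pvCountLe t k - 1 < t.length by omega)
    rw [hgd] at hmono
    exact hmono
  · rintro ⟨h1, h2⟩
    have hlt : pvCountLe t k - 1 < t.length := by omega
    rw [List.getD_eq_getElem t "" hlt] at h2
    have : k ∈ t := h2 ▸ List.getElem_mem hlt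
    exact (PySem.List.mem_sorted _ _ _ _).mp this

-- per-key agreement of the two startswith-mode tests
theorem starts_pred (keys : List String) (k : String) :
    keys.any (fun key => PySem.Str.startswith k key)
      = pvDropStarts ((PySem.List.sorted keys (fun x => x) false).foldl pvPruneStep []) k := by
  set t0 := PySem.List.sorted keys (fun x => x) false with ht0
  have hs0 : t0.Pairwise (· ≤ ·) := PySem.List.sorted_pairwise keys (fun x => x)
  obtain ⟨hp1, hp2, hp3, _, hp5⟩ := prune_spec t0 [] hs0 (by simp) (by simp) (by simp)
  set t := t0.foldl pvPruneStep [] with htt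
  obtain ⟨hlen, hbelow, habove⟩ := countLe_spec t k hp1
  rw [Bool.eq_iff_iff]
  unfold pvDropStarts
  simp only [List.any_eq_true, Bool.and_eq_true, decide_eq_true_eq]
  constructor
  · rintro ⟨p, hp, hswp⟩
    have hpt0 : p ∈ t0 := (PySem.List.mem_sorted _ _ _ _).mpr hp
    obtain ⟨q, hqt, hqp⟩ := hp5 p hpt0
    have hqk : q.toList <+: k.toList := hqp.trans ((sw_iff k p).mp hswp)
    have hqlek : q ≤ k := String.le_iff_toList_le.mpr (chars_prefix_le hqk)
    obtain ⟨i, hi, hti⟩ := List.mem_iff_getElem.mp hqt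
    have hgd : t.getD i "" = q := by rw [List.getD_eq_getElem t "" hi]; exact hti
    have hic : i < pvCountLe t k := by
      by_contra hcon
      exact absurd hqlek (not_le.mpr (hgd ▸ habove i (by omega) hi))
    have hc1 : 1 ≤ pvCountLe t k := by omega
    refine ⟨hc1, ?_⟩
    set d := t.getD (pvCountLe t k - 1) "" with hd
    have hdt : d ∈ t := by
      rw [hd, List.getD_eq_getElem t "" (by omega)]
      exact List.getElem_mem _
    have hdk : d ≤ k := hbelow _ (by omega)
    have hqd : q ≤ d := hgd ▸ getD_mono hp1 (by omega) (by omega)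
    rw [sw_iff]
    by_cases hqd' : q = d
    · exact hqd' ▸ hqk
    · have hlt : q < d := lt_of_le_of_ne hqd hqd'
      have : q.toList <+: d.toList :=
        lex_prefix_between q.toList d.toList k.toList hqk
          (String.lt_iff_toList_lt.mp hlt) (String.le_iff_toList_le.mp hdk)
      exact absurd this (pairwise_mem_of_lt hp1 hp2 hqt hdt hlt)
  · rintro ⟨h1, h2⟩
    set d := t.getD (pvCountLe t k - 1) "" with hd
    have hdt : d ∈ t := by
      rw [hd, List.getD_eq_getElem t "" (by omega)]
      exact List.getElem_mem _
    rcases hp3 d hdt with hcon | hdt0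
    · simp at hcon
    · exact ⟨d, (PySem.List.mem_sorted _ _ _ _).mp hdt0, h2⟩

-- ===== VERDICT (by name: the statement is the Claim_ definition above) =====
theorem dict_exclude_spec : Claim_equal_dict_exclude := by
  intro data keys mode _ _
  unfold Spec_dict_exclude dict_exclude dict_exclude_alt
  by_cases h1 : (mode == "exact") = true
  · simp only [h1, if_true]
    exact congrArg data.filter (funext fun kv => by rw [exact_pred])
  · rw [Bool.not_eq_true] at h1
    by_cases h2 : (mode == "startswith") = true
    · simp only [h1, h2, if_true, Bool.false_eq_true, if_false]
      exact congrArg data.filter (funext fun kv => by rw [starts_pred])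
    · rw [Bool.not_eq_true] at h2
      simp [h1, h2]
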